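-- pv_equiv track=rewrite | github.com/Dudzian/Dudzian | bot_core/exchanges/manager.py | _resolve_symbol_from_markets
-- ===== SOURCE A (Python) =====
-- from typing import Any, Callable, Dict, List, Mapping, MutableMapping, Optional, Sequence, Tuple
--
-- def _resolve_symbol_from_markets(
--
--     base: str,
--     markets: Dict[str, Any],
--     preferred_quotes: set,
--     fallback_quote: str,
-- ) -> Optional[str]:
--     candidates: List[Tuple[str, str]] = []
--     for symbol in markets.keys():
--         if not isinstance(symbol, str) or "/" not in symbol:
--             continue
--         base_part, quote_part = symbol.split("/", 1)
--         if base_part.upper() != base.upper():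
--             continue
--         candidates.append((quote_part.upper(), symbol))
--
--     for quote, candidate in candidates:
--         if quote in preferred_quotes:
--             return candidate
--     if candidates:
--         return candidates[0][1]
--     if fallback_quote:
--         return f"{base}/{fallback_quote}"
--     return None
-- ===== SOURCE B (Python) =====
-- def _resolve_symbol_from_markets(
--     base,
--     markets,
--     preferred_quotes,
--     fallback_quote,
-- ):
--     base_u = base.upper()
--     first = None
--     for symbol in markets.keys():
--         if not isinstance(symbol, str) or "/" not in symbol:
--             continue
--         base_part, quote_part = symbol.split("/", 1)
--         if base_part.upper() != base_u:
--             continue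
--         if quote_part.upper() in preferred_quotes:
--             return symbol
--         if first is None:
--             first = symbol
--     if first is not None:
--         return first
--     return f"{base}/{fallback_quote}" if fallback_quote else None
-- ===== Notes on version B (the rewrite author's own statement) =====
-- stated objective: simpler
-- what changed: Replaces A's two-pass design (build a candidates list of (quote,symbol) pairs, then scan it twice) with a single pass over the market keys that returns immediately on the first preferred-quote match and records only the first matching symbol for the non-preferred case; no intermediate list is built.
import Mathlib
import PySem

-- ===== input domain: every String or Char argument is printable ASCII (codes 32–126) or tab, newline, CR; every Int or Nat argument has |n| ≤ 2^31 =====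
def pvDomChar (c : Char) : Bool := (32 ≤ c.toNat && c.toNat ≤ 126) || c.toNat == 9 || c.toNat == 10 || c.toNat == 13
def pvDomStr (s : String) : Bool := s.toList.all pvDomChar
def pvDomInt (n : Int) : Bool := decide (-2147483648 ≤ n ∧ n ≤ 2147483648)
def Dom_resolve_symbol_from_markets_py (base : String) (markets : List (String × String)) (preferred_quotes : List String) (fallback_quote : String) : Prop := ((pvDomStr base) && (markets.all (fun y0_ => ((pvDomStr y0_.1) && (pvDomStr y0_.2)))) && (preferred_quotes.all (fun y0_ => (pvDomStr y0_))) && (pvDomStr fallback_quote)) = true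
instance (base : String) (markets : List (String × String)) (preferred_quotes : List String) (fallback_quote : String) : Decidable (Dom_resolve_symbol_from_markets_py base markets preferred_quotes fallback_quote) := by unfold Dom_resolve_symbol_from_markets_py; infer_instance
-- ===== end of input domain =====

/-
B replaces A's two-pass design (build a candidates list, then scan it twice)
with a single pass over the market keys, returning on the first preferred match
and remembering the first matching symbol otherwise (objective: simpler).
-/


-- shared translation of `symbol.split("/", 1)` followed by the 2-tuple unpacking
-- (both Pythons call this same builtin): the pair (base_part, quote_part).
def splitBQ (s : String) : Option (String × String) :=
  match PySem.Str.splitMax? s "/" 1 with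
  | some (bp :: qp :: _) => some (bp, qp)
  | _ => none

-- ===== PORT A =====
-- the first loop of A: accumulate the candidates list in order
def candsLoop (base : String) : List (String × String) → List String → List (String × String)
  | acc, [] => acc
  | acc, s :: rest =>
    if PySem.Str.isIn "/" s then
      match splitBQ s with
      | some (bp, qp) =>
        if PySem.Str.upper bp ≠ PySem.Str.upper base then candsLoop base acc rest
        else candsLoop base (acc ++ [(PySem.Str.upper qp, s)]) rest
      | none => candsLoop base acc rest
    else candsLoop base acc rest

def resolve_symbol_from_markets_py (base : String) (markets : List (String × String)) (preferred_quotes : List String) (fallback_quote : String) : Option String :=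
  let cands := candsLoop base [] (PySem.List.dedup (markets.map Prod.fst))
  match cands.find? (fun p => preferred_quotes.contains p.1) with
  | some p => some p.2
  | none =>
    match cands with
    | p :: _ => some p.2
    | [] => if fallback_quote ≠ "" then some (base ++ "/" ++ fallback_quote) else none

-- ===== PORT B =====
-- B's single loop: early return on a preferred quote, remember the first match
def goB (baseU : String) (preferred_quotes : List String) (base fallback_quote : String) : List String → Option String → Option String
  | [], first =>
    match first with
    | some f => some f
    | none => if fallback_quote ≠ "" then some (base ++ "/" ++ fallback_quote) else none
  | s :: rest, first =>
    if PySem.Str.isIn "/" s then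
      match splitBQ s with
      | some (bp, qp) =>
        if PySem.Str.upper bp ≠ baseU then goB baseU preferred_quotes base fallback_quote rest first
        else if preferred_quotes.contains (PySem.Str.upper qp) then some s
        else goB baseU preferred_quotes base fallback_quote rest
               (match first with | none => some s | some f => some f)
      | none => goB baseU preferred_quotes base fallback_quote rest first
    else goB baseU preferred_quotes base fallback_quote rest first

def resolve_symbol_from_markets_py_alt (base : String) (markets : List (String × String)) (preferred_quotes : List String) (fallback_quote : String) : Option String :=
  goB (PySem.Str.upper base) preferred_quotes base fallback_quote
      (PySem.List.dedup (markets.map Prod.fst)) none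

-- ===== PRECONDITION & SPEC =====
def Spec_resolve_symbol_from_markets_py (base : String) (markets : List (String × String)) (preferred_quotes : List String) (fallback_quote : String) (out : Option String) : Prop := out = resolve_symbol_from_markets_py_alt base markets preferred_quotes fallback_quote
instance (base : String) (markets : List (String × String)) (preferred_quotes : List String) (fallback_quote : String) (out : Option String) : Decidable (Spec_resolve_symbol_from_markets_py base markets preferred_quotes fallback_quote out) := by unfold Spec_resolve_symbol_from_markets_py; infer_instance

-- ===== CLAIM (what is proved, stated in full; the proofs are below) =====
def Claim_equal_resolve_symbol_from_markets_py : Prop := ∀ (base : String) (markets : List (String × String)) (preferred_quotes : List String) (fallback_quote : String), Dom_resolve_symbol_from_markets_py base markets preferred_quotes fallback_quote → Spec_resolve_symbol_from_markets_py base markets preferred_quotes fallback_quote (resolve_symbol_from_markets_py base markets preferred_quotes fallback_quote)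

-- ===== LEMMAS AND PROOFS =====

-- accumulator-free form of A's candidate list
def candsRec (baseU : String) : List String → List (String × String)
  | [] => []
  | s :: rest =>
    if PySem.Str.isIn "/" s then
      match splitBQ s with
      | some (bp, qp) =>
        if PySem.Str.upper bp ≠ baseU then candsRec baseU rest
        else (PySem.Str.upper qp, s) :: candsRec baseU rest
      | none => candsRec baseU rest
    else candsRec baseU rest

-- what A does with the finished candidate list, parametrised by B's `first` state
def finish (base fallback_quote : String) (preferred_quotes : List String)
    (first : Option String) (cands : List (String × String)) : Option String :=
  match cands.find? (fun p => preferred_quotes.contains p.1) with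
  | some p => some p.2
  | none =>
    match first with
    | some f => some f
    | none =>
      match cands with
      | p :: _ => some p.2
      | [] => if fallback_quote ≠ "" then some (base ++ "/" ++ fallback_quote) else none

theorem candsLoop_eq (base : String) :
    ∀ (keys : List String) (acc : List (String × String)),
      candsLoop base acc keys = acc ++ candsRec (PySem.Str.upper base) keys := by
  intro keys
  induction keys with
  | nil => intro acc; simp [candsLoop, candsRec]
  | cons s rest ih =>
    intro acc
    simp only [candsLoop, candsRec]
    split_ifs with h
    · cases hsp : splitBQ s with
      | none => exact ih acc
      | some p =>
        obtain ⟨bp, qp⟩ := p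
        dsimp only
        split_ifs with hb
        · exact ih acc
        · rw [ih]; simp
    · exact ih acc

theorem goB_eq (base fallback_quote : String) (preferred_quotes : List String) :
    ∀ (keys : List String) (first : Option String),
      goB (PySem.Str.upper base) preferred_quotes base fallback_quote keys first =
        finish base fallback_quote preferred_quotes first
          (candsRec (PySem.Str.upper base) keys) := by
  intro keys
  induction keys with
  | nil => intro first; cases first <;> rfl
  | cons s rest ih =>
    intro first
    simp only [goB, candsRec]
    split_ifs with h
    · cases hsp : splitBQ s with
      | none => exact ih first
      | some p =>
        obtain ⟨bp, qp⟩ := p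
        dsimp only
        split_ifs with hb hq
        · exact ih first
        · -- preferred hit: find? on the cons list succeeds at the head
          have hstep : List.find? (fun p => preferred_quotes.contains p.1)
              ((PySem.Str.upper qp, s) :: candsRec (PySem.Str.upper base) rest) =
              some (PySem.Str.upper qp, s) := List.find?_cons_of_pos (by simpa using hq)
          rw [finish.eq_def, hstep]
        · -- not preferred: the head is skipped by find?
          have hstep : List.find? (fun p => preferred_quotes.contains p.1)
              ((PySem.Str.upper qp, s) :: candsRec (PySem.Str.upper base) rest) =
              List.find? (fun p => preferred_quotes.contains p.1)
                (candsRec (PySem.Str.upper base) rest) :=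
            List.find?_cons_of_neg (by simpa using hq)
          rw [ih, finish.eq_def, finish.eq_def, hstep]
          cases hfind : List.find? (fun p => preferred_quotes.contains p.1)
              (candsRec (PySem.Str.upper base) rest) with
          | some q => rfl
          | none => cases first <;> rfl
    · exact ih first

-- ===== VERDICT (by name: the statement is the Claim_ definition above) =====
theorem resolve_symbol_from_markets_py_spec : Claim_equal_resolve_symbol_from_markets_py := by
  intro base markets preferred_quotes fallback_quote _
  unfold Spec_resolve_symbol_from_markets_py
  unfold resolve_symbol_from_markets_py resolve_symbol_from_markets_py_alt
  rw [goB_eq, candsLoop_eq, List.nil_append]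
  rfl
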